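-- pv_equiv track=rewrite | github.com/dongho108/breaking-codingtest | week4/thu/mg_p60058.py | solution
-- ===== SOURCE A (Python) =====
-- def split_uv(string):
--     left, right = 0, 0
--     for i in range(len(string)):
--         if string[i] == '(':
--             left += 1
--         if string[i] == ')':
--             right += 1
--         if left == right:
--             u = string[0:i+1]
--             v = string[i+1:]
--             return u, v
--
-- def check(u):
--     stack = []
--     for i in u:
--         if i == '(':
--             stack.append(i)
--         else:
--             if len(stack) == 0:
--                 return False
--             if stack[-1] == '(':
--                 stack.pop()
--     if len(stack) == 0:
--         return True
--     else:
--         return False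
--
-- def solution(p):
--     answer = ''
--
--     if len(p) == 0:
--         return p
--
--     u, v = split_uv(p)
--     chk = check(u)
--
--     if chk == True:
--         return u + solution(v)
--     if chk == False:
--         answer += '('
--         answer += solution(v)
--         answer += ')'
--         for i in u[1:-1]:
--             if i == '(':
--                 answer += ')'
--             elif i == ')':
--                 answer += '('
--     return answer
-- ===== SOURCE B (Python) =====
-- def _flip(mid):
--     return ''.join('(' if c == ')' else ')' for c in mid if c in '()')
--
-- def solution(p):
--     # stage 1: one pass cutting p into minimal balance-zero blocks, judging each on the fly
--     blocks = []
--     buf = []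
--     bal = 0
--     cnt = 0
--     ok = True
--     for ch in p:
--         buf.append(ch)
--         if ch == '(':
--             bal += 1
--             cnt += 1
--         else:
--             if ch == ')':
--                 bal -= 1
--             if cnt == 0:
--                 ok = False
--             else:
--                 cnt -= 1
--         if bal == 0:
--             blocks.append((''.join(buf), ok and cnt == 0))
--             buf, cnt, ok = [], 0, True
--     if buf:
--         raise ValueError("unbalanced parentheses: unfinishable trailing block")
--     # stage 2: fold the blocks into prefix pieces and nested suffix layers
--     pre, suf = [], []
--     for text, good in blocks:
--         if good:
--             pre.append(text)
--         else:
--             pre.append('(')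
--             suf.insert(0, ')' + _flip(text[1:-1]))
--     return ''.join(pre) + ''.join(suf)
-- ===== Notes on version B (the rewrite author's own statement) =====
-- stated objective: alternative
-- what changed: Replaces A's recursion (re-scanning each block with split_uv and check, rebuilding strings per level) by two staged passes: one linear scan that cuts p into minimal balanced blocks while judging each block with an inline counter, then a fold over the block list into prefix pieces and nested suffix layers.
-- outside the precondition, e.g. on solution('('): A raises TypeError, B raises ValueError; on solution(')'): A raises TypeError, B raises ValueError
import Mathlib
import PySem

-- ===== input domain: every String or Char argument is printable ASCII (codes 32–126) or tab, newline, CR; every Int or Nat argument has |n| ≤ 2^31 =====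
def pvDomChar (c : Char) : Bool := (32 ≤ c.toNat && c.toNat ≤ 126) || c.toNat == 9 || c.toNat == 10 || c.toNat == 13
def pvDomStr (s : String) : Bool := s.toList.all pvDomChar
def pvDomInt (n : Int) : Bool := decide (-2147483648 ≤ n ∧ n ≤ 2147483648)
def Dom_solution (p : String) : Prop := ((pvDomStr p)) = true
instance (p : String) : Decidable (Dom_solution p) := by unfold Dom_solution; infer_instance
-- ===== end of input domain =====

-- B replaces A's recursive split/check/rebuild with two staged passes: one linear scan that
-- cuts p into minimal balanced blocks while judging each block's correctness on the fly,
-- then a fold over the block list into prefix pieces and nested suffix layers ("alternative").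

-- ===== PORT A =====
-- split_uv: loop over the string with separate left/right counters; none = fall off the
-- end (Python returns None and solution's unpacking raises; excluded by Pre_solution).
def splitUvA (left right : Int) (acc rest : List Char) : Option (List Char × List Char) :=
  match rest with
  | [] => none
  | c :: cs =>
    let left := if c = '(' then left + 1 else left
    let right := if c = ')' then right + 1 else right
    if left = right then some (acc ++ [c], cs)
    else splitUvA left right (acc ++ [c]) cs

-- check: explicit stack of '(' (top at head, matching Python's list tail).
def checkA (stack : List Char) (u : List Char) : Bool :=
  match u with
  | [] => stack.isEmpty
  | c :: cs =>
    if c = '(' then checkA ('(' :: stack) cs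
    else
      match stack with
      | [] => false
      | t :: rest => if t = '(' then checkA rest cs else checkA stack cs

-- the `for i in u[1:-1]` flipping loop, appending to `answer`
def flipA (mid : List Char) : List Char :=
  mid.foldl (fun a c => if c = '(' then a ++ [')'] else if c = ')' then a ++ ['('] else a) []

theorem splitUvA_length {l r : Int} {acc rest : List Char} {u v : List Char}
    (h : splitUvA l r acc rest = some (u, v)) : v.length < rest.length := by
  induction rest generalizing l r acc with
  | nil => simp [splitUvA] at h
  | cons c cs ih =>
    rw [splitUvA] at h
    split at h <;> split at h <;> split at h <;>
      first
        | (simp only [Option.some.injEq, Prod.mk.injEq] at h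
           obtain ⟨-, rfl⟩ := h
           simp)
        | exact Nat.lt_succ_of_lt (ih h)

def solA (p : List Char) : List Char :=
  if p.length = 0 then p  -- if len(p) == 0: return p
  else
    match h : splitUvA 0 0 [] p with
    | none => []  -- Python raises here (unpacking None); outside Pre_solution
    | some (u, v) =>
      if checkA [] u then u ++ solA v
      else '(' :: (solA v ++ ')' :: flipA (u.drop 1).dropLast)  -- u[1:-1] = drop 1 then dropLast
termination_by p.length
decreasing_by all_goals exact splitUvA_length h

def solution (p : String) : String := String.ofList (solA p.toList)

-- ===== PORT B =====
-- the _flip generator expression (skips non-paren chars)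
def flipB (mid : List Char) : List Char :=
  mid.filterMap (fun ch => if ch = '(' then some ')' else if ch = ')' then some '(' else none)

-- stage-1 loop body: state = (blocks, buf, bal, cnt, ok)
def stepB (st : List (List Char × Bool) × List Char × Int × Int × Bool) (ch : Char) :
    List (List Char × Bool) × List Char × Int × Int × Bool :=
  match st with
  | (blocks, buf, bal, cnt, ok) =>
    let buf := buf ++ [ch]
    let bal := if ch = '(' then bal + 1 else if ch = ')' then bal - 1 else bal
    let co : Int × Bool := if ch = '(' then (cnt + 1, ok)
                           else if cnt = 0 then (cnt, false) else (cnt - 1, ok)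
    if bal = 0 then (blocks ++ [(buf, co.2 && decide (co.1 = 0))], [], 0, 0, true)
    else (blocks, buf, bal, co.1, co.2)

-- stage-2 loop body: state = (pre, suf), lists of pieces joined at the end
def foldBlockB (ps : List (List Char) × List (List Char)) (b : List Char × Bool) :
    List (List Char) × List (List Char) :=
  if b.2 then (ps.1 ++ [b.1], ps.2)
  else (ps.1 ++ [['(']], (')' :: flipB (b.1.drop 1).dropLast) :: ps.2)

def solution_alt (p : String) : String :=
  let blocks := (p.toList.foldl stepB ([], [], 0, 0, true)).1
  let ps := blocks.foldl foldBlockB ([], [])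
  String.ofList (ps.1.flatten ++ ps.2.flatten)

-- ===== PRECONDITION & SPEC =====
-- Pre_ excludes exactly the inputs where A raises: when '(' and ')' counts differ,
-- split_uv eventually returns None and `u, v = split_uv(p)` raises TypeError.
def Pre_solution (p : String) : Prop := p.toList.count '(' = p.toList.count ')'
instance (p : String) : Decidable (Pre_solution p) := by unfold Pre_solution; infer_instance
def pvWitness_solution : String := "(()))("
def Spec_solution (p : String) (out : String) : Prop := out = solution_alt p
instance (p : String) (out : String) : Decidable (Spec_solution p out) := by unfold Spec_solution; infer_instance

-- ===== CLAIM (what is proved, stated in full; the proofs are below) =====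
def Claim_equal_solution : Prop := ∀ (p : String), Dom_solution p → Pre_solution p → Spec_solution p (solution p)

-- ===== LEMMAS AND PROOFS =====

-- proof-side recursion mirroring stage 1 block by block
def splitFold (bal : Int) (buf : List Char) (n : Nat) (ok : Bool) :
    List Char → List (List Char × Bool)
  | [] => []
  | c :: cs =>
    let bal' := if c = '(' then bal + 1 else if c = ')' then bal - 1 else bal
    let n' := if c = '(' then n + 1 else n - 1
    let ok' := if c = '(' then ok else if n = 0 then false else ok
    if bal' = 0 then (buf ++ [c], ok' && decide (n' = 0)) :: splitFold 0 [] 0 true cs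
    else splitFold bal' (buf ++ [c]) n' ok' cs

-- proof-side rendering of a block list, matching solA's two branches
def render : List (List Char × Bool) → List Char
  | [] => []
  | (t, g) :: bs =>
    if g then t ++ render bs
    else '(' :: (render bs ++ ')' :: flipB (t.drop 1).dropLast)

theorem splitEx {l r : Int} {acc rest u v : List Char}
    (h : splitUvA l r acc rest = some (u, v)) : ∃ w, u = acc ++ w ∧ rest = w ++ v := by
  induction rest generalizing l r acc with
  | nil => simp [splitUvA] at h
  | cons c cs ih =>
    rw [splitUvA] at h
    split at h <;> split at h <;> split at h <;>
      first
        | (simp only [Option.some.injEq, Prod.mk.injEq] at h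
           obtain ⟨rfl, rfl⟩ := h
           exact ⟨[c], rfl, rfl⟩)
        | (obtain ⟨w, hw1, hw2⟩ := ih h
           exact ⟨c :: w, by simp [hw1], by simp [hw2]⟩)

theorem flip_eq (mid : List Char) : flipA mid = flipB mid := by
  have key : ∀ (xs : List Char) (a : List Char),
      xs.foldl (fun a c => if c = '(' then a ++ [')'] else if c = ')' then a ++ ['('] else a) a
        = a ++ flipB xs := by
    intro xs
    induction xs with
    | nil => intro a; simp [flipB]
    | cons c cs ih =>
      intro a
      by_cases h1 : c = '('
      · simp [h1, ih, flipB]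
      · by_cases h2 : c = ')' <;> simp [h1, h2, ih, flipB]
  simpa [flipA] using key mid []

-- splitFold computes, block by block, exactly split_uv plus check
theorem splitFold_eq (rest : List Char) : ∀ (l r : Int) (buf : List Char) (n : Nat) (ok : Bool),
    splitFold (l - r) buf n ok rest =
      match splitUvA l r buf rest with
      | none => []
      | some (u, v) =>
          (u, ok && checkA (List.replicate n '(') (rest.take (rest.length - v.length)))
            :: splitFold 0 [] 0 true v := by
  induction rest with
  | nil => intro l r buf n ok; rfl
  | cons c cs ih =>
    intro l r buf n ok
    rw [splitFold, splitUvA]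
    have hne : ('(' : Char) ≠ ')' := by decide
    have hbal : (if c = '(' then l - r + 1 else if c = ')' then l - r - 1 else l - r)
        = (if c = '(' then l + 1 else l) - (if c = ')' then r + 1 else r) := by
      by_cases h1 : c = '('
      · subst h1; simp [hne]; omega
      · by_cases h2 : c = ')' <;> simp [h1, h2] <;> omega

    set l' := if c = '(' then l + 1 else l with hl'
    set r' := if c = ')' then r + 1 else r with hr'
    have hiff : ((if c = '(' then l - r + 1 else if c = ')' then l - r - 1 else l - r) = 0)
        ↔ (l' = r') := by rw [hbal]; omega
    by_cases hz : l' = r'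
    · rw [if_pos (hiff.mpr hz), if_pos hz]
      dsimp only
      simp only [List.length_cons, Nat.add_sub_cancel_left, List.take_succ_cons,
        List.take_zero]
      congr 2
      -- ok' && (n' = 0) = ok && checkA (replicate n) [c]
      by_cases hc : c = '('
      · simp [hc, checkA]
      · cases n with
        | zero => simp [hc, checkA]
        | succ m =>
          simp only [hc, if_false, if_neg (Nat.succ_ne_zero m), List.replicate_succ, checkA]
          cases m <;> simp [List.replicate_succ]
    · rw [if_neg (fun h => hz (hiff.mp h)), if_neg hz, hbal]
      rw [ih l' r' (buf ++ [c]) (if c = '(' then n + 1 else n - 1)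
            (if c = '(' then ok else if n = 0 then false else ok)]
      cases hs : splitUvA l' r' (buf ++ [c]) cs with
      | none => rfl
      | some uv =>
        obtain ⟨u, v⟩ := uv
        dsimp only
        have hvlen : v.length < cs.length := splitUvA_length hs
        have hlen : (c :: cs : List Char).length - v.length = (cs.length - v.length) + 1 := by
          simp only [List.length_cons]; omega
        rw [hlen, List.take_succ_cons]
        congr 2
        -- check step: ok' && checkA (replicate n') s = ok && checkA (replicate n) (c :: s)
        by_cases hc : c = '('
        · simp [hc, checkA, List.replicate_succ]
        · cases n with
          | zero => simp [hc, checkA]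
          | succ m =>
            simp only [hc, if_false, if_neg (Nat.succ_ne_zero m), List.replicate_succ, checkA,
              Nat.add_sub_cancel]
            simp

-- top-level instance of splitFold_eq
theorem splitFold_zero (p : List Char) :
    splitFold 0 [] 0 true p =
      match splitUvA 0 0 [] p with
      | none => []
      | some (u, v) => (u, checkA [] u) :: splitFold 0 [] 0 true v := by
  have h := splitFold_eq p 0 0 [] 0 true
  simp only [sub_zero] at h
  rw [h]
  cases hs : splitUvA 0 0 [] p with
  | none => rfl
  | some uv =>
    obtain ⟨u, v⟩ := uv
    obtain ⟨w, hw1, hw2⟩ := splitEx hs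
    simp only [List.nil_append] at hw1
    subst hw1
    have htake : p.take (p.length - v.length) = u := by
      subst hw2; simp
    dsimp only
    rw [htake]
    simp

-- solA renders the block list
theorem solA_render (N : Nat) : ∀ (p : List Char), p.length ≤ N →
    solA p = render (splitFold 0 [] 0 true p) := by
  induction N with
  | zero =>
    intro p hp
    have : p = [] := List.length_eq_zero_iff.mp (Nat.le_zero.mp hp)
    subst this
    rw [solA]; rfl
  | succ N ih =>
    intro p hp
    rcases hnil : p with _ | ⟨c, cs⟩
    · rw [solA]; rfl
    · rw [solA, if_neg (by simp), splitFold_zero]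
      cases hs : splitUvA 0 0 [] (c :: cs) with
      | none => rfl
      | some uv =>
        obtain ⟨u, v⟩ := uv
        have hv : v.length ≤ N := by
          have := splitUvA_length hs
          simp only [List.length_cons] at this
          rw [hnil] at hp
          simp only [List.length_cons] at hp
          omega
        rw [render]
        by_cases hc : checkA [] u = true
        · simp [hc, ih v hv]
        · simp only [Bool.not_eq_true] at hc
          simp [hc, ih v hv, flip_eq]

-- B's stage-1 foldl produces exactly the splitFold block list
theorem stepB_eq (blocks : List (List Char × Bool)) (buf : List Char) (bal : Int) (n : Nat)
    (ok : Bool) (c : Char) :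
    stepB (blocks, buf, bal, (n : Int), ok) c =
      if (if c = '(' then bal + 1 else if c = ')' then bal - 1 else bal) = 0 then
        (blocks ++ [(buf ++ [c],
          (if c = '(' then ok else if n = 0 then false else ok) &&
            decide ((if c = '(' then n + 1 else n - 1) = 0))], [], 0, ((0 : Nat) : Int), true)
      else (blocks, buf ++ [c],
        (if c = '(' then bal + 1 else if c = ')' then bal - 1 else bal),
        (((if c = '(' then n + 1 else n - 1) : Nat) : Int),
        (if c = '(' then ok else if n = 0 then false else ok)) := by
  by_cases hc : c = '('
  · have h1 : ((n : Int) + 1) ≠ 0 := by omega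
    simp [stepB, hc, h1]
  · cases n with
    | zero => simp [stepB, hc]
    | succ m =>
      have h2 : ((m : Int) + 1) ≠ 0 := by omega
      simp [stepB, hc, h2, Int.natCast_eq_zero]

theorem stage1_eq (rest : List Char) :
    ∀ (blocks : List (List Char × Bool)) (buf : List Char) (bal : Int) (n : Nat) (ok : Bool),
    (rest.foldl stepB (blocks, buf, bal, (n : Int), ok)).1
      = blocks ++ splitFold bal buf n ok rest := by
  induction rest with
  | nil => intro blocks buf bal n ok; simp [splitFold]
  | cons c cs ih =>
    intro blocks buf bal n ok
    rw [List.foldl_cons, stepB_eq, splitFold]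
    by_cases hz : (if c = '(' then bal + 1 else if c = ')' then bal - 1 else bal) = 0
    · rw [if_pos hz, if_pos hz, ih _ [] 0 0 true]
      simp
    · rw [if_neg hz, if_neg hz]
      exact ih blocks (buf ++ [c]) _ _ _

-- B's stage-2 foldl renders the block list around accumulated prefix/suffix pieces
theorem stage2_eq (bs : List (List Char × Bool)) :
    ∀ (pre suf : List (List Char)),
    ((bs.foldl foldBlockB (pre, suf)).1.flatten ++ (bs.foldl foldBlockB (pre, suf)).2.flatten)
      = pre.flatten ++ render bs ++ suf.flatten := by
  induction bs with
  | nil => intro pre suf; simp [render]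
  | cons b bs ih =>
    intro pre suf
    obtain ⟨t, g⟩ := b
    rw [List.foldl_cons]
    cases g with
    | true => rw [render]; simp only [if_pos rfl]; simp [foldBlockB, ih]
    | false =>
      rw [render]
      simp only [Bool.false_eq_true, if_false]
      simp [foldBlockB, ih]

theorem solution_spec : Claim_equal_solution := by
  intro p _ _
  unfold Spec_solution solution solution_alt
  have h1 : (p.toList.foldl stepB ([], [], 0, 0, true)).1 = splitFold 0 [] 0 true p.toList := by
    have := stage1_eq p.toList [] [] 0 0 true
    simpa using this
  simp only [h1]
  rw [stage2_eq (splitFold 0 [] 0 true p.toList) [] []]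
  rw [solA_render p.toList.length p.toList (le_refl _)]
  simp
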